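-- pv_equiv track=rewrite | github.com/Ani0202/DSA-Questions | Strings/String simulation/Prob3.py | solve
-- ===== SOURCE A (Python) =====
-- def solve(A, B):
--     n = len(A)
--     if n == 1:
--         if B == 1:
--             return ''
--         else:
--             return A
--     suff = [0] * n
--     suff[-1] = 1
--     for i in range(n-2, -1, -1):
--         if A[i] == A[i + 1]:
--             suff[i] = suff[i+1] + 1
--
--         else:
--             suff[i] = 1
--
--     ans = ''
--     i = 0
--     while i < n:
--         if suff[i] == B:
--             i = i + B
--         else:
--             ans = ans + (A[i] * suff[i])
--             i = i + suff[i]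
--
--     return ans
-- ===== SOURCE B (Python) =====
-- def solve(A, B):
--     out = []
--     i = 0
--     n = len(A)
--     while i < n:
--         j = i
--         while j < n and A[j] == A[i]:
--             j += 1
--         if j - i != B:
--             out.append(A[i:j])
--         i = j
--     return ''.join(out)
-- ===== Notes on version B (the rewrite author's own statement) =====
-- stated objective: simpler
-- what changed: Single forward pass over maximal runs with a two-pointer scan, keeping each run whose length differs from B, instead of a backward suffix-run-length table followed by a forward index-jump walk (and no single-character special case).
-- outside the precondition, e.g. on solve('', 1): A raises IndexError, B returns ''
-- crash fix: On the empty string A raises IndexError (suff[-1] on an empty list) while B returns ''. — e.g. on solve("", 1): A raises IndexError, B returns ""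
import Mathlib
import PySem

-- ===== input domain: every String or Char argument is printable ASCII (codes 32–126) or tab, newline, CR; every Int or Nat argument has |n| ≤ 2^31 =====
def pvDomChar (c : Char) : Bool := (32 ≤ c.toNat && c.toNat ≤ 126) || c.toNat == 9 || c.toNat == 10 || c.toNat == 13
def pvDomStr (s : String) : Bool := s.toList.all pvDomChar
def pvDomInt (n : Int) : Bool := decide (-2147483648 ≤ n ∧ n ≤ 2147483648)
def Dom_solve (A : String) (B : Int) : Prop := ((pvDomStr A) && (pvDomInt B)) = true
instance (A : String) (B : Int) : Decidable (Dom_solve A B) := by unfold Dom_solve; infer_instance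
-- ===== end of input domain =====

-- B simplifies A: one forward two-pointer pass over maximal runs, keeping runs of length ≠ B,
-- instead of A's backward suffix-run-length table plus forward jump walk. Same O(n) cost.

-- ===== PORT A =====
-- suff[i] = length of the maximal equal-char run starting at i, built right-to-left like A's loop
def buildSuff : List Char → List Nat
  | [] => []
  | [_] => [1]
  | c :: d :: t =>
      let r := buildSuff (d :: t)
      (if c == d then r.headD 0 + 1 else 1) :: r

-- A's while loop: i advances by suff[i] each step; fuel = n bounds the ≤ n iterations
def walkA : Nat → List Char → List Nat → Int → List Char
  | 0, _, _, _ => []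
  | _ + 1, [], _, _ => []
  | _ + 1, _ :: _, [], _ => []
  | fuel + 1, c :: t, k :: ks, B =>
      if (k : Int) = B then
        walkA fuel ((c :: t).drop k) ((k :: ks).drop k) B
      else
        List.replicate k c ++ walkA fuel ((c :: t).drop k) ((k :: ks).drop k) B

def solve (A : String) (B : Int) : String :=
  if A.toList.length == 1 then (if B == 1 then "" else A)
  else String.ofList (walkA A.toList.length A.toList (buildSuff A.toList) B)

-- ===== PORT B =====
-- forward scan: take the maximal run at the front, keep it iff its length ≠ B
def walkB : List Char → Int → List Char
  | [], _ => []
  | c :: t, B =>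
      let pre := t.takeWhile (· == c)
      (if ((pre.length + 1 : Nat) : Int) ≠ B then c :: pre else []) ++
        walkB (t.drop pre.length) B
termination_by s _ => s.length
decreasing_by
  simp only [List.length_cons, List.length_drop]
  omega

def solve_alt (A : String) (B : Int) : String := String.ofList (walkB A.toList B)

-- ===== PRECONDITION & SPEC =====
-- Pre_ excludes only the empty string, on which A raises IndexError (suff[-1] on an empty list).
def Pre_solve (A : String) (B : Int) : Prop := A ≠ ""
instance (A : String) (B : Int) : Decidable (Pre_solve A B) := by unfold Pre_solve; infer_instance
def pvWitness_solve : String × Int := ("aabba", 2)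

-- On the empty string A raises IndexError while B returns ''.
def Raises_solve (A : String) (B : Int) : Prop := A = ""
instance (A : String) (B : Int) : Decidable (Raises_solve A B) := by unfold Raises_solve; infer_instance
def pvRaiseWitness_solve : String × Int := ("", 1)
def pvRaiseWitnessOut_solve : String := ""

def Spec_solve (A : String) (B : Int) (out : String) : Prop := out = solve_alt A B
instance (A : String) (B : Int) (out : String) : Decidable (Spec_solve A B out) := by unfold Spec_solve; infer_instance

-- ===== CLAIM (what is proved, stated in full; the proofs are below) =====
def Claim_equal_solve : Prop := ∀ (A : String) (B : Int), Dom_solve A B → Pre_solve A B → Spec_solve A B (solve A B)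
def Claim_raises_solve : Prop := (∀ (A : String) (B : Int), Dom_solve A B → Raises_solve A B → ¬ Pre_solve A B) ∧ (Dom_solve (pvRaiseWitness_solve.1) (pvRaiseWitness_solve.2) ∧ Raises_solve (pvRaiseWitness_solve.1) (pvRaiseWitness_solve.2) ∧ solve_alt (pvRaiseWitness_solve.1) (pvRaiseWitness_solve.2) = pvRaiseWitnessOut_solve)

-- ===== LEMMAS AND PROOFS =====

lemma buildSuff_headD (t : List Char) (c : Char) :
    (buildSuff (c :: t)).headD 0 = (t.takeWhile (· == c)).length + 1 := by
  induction t generalizing c with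
  | nil => simp [buildSuff]
  | cons d t' ih =>
      by_cases h : c = d
      · subst h
        have := ih c
        simp only [buildSuff, if_pos (beq_self_eq_true c)]
        simp only [List.headD] at this ⊢
        rw [this]
        simp [List.takeWhile]
      · have h1 : (c == d) = false := beq_false_of_ne h
        have h2 : (d == c) = false := beq_false_of_ne (Ne.symm h)
        simp [buildSuff, h1, List.takeWhile, h2]

lemma buildSuff_cons (c : Char) (t : List Char) :
    buildSuff (c :: t) = ((t.takeWhile (· == c)).length + 1) :: buildSuff t := by
  cases t with
  | nil => simp [buildSuff]
  | cons d t' =>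
      have hh := buildSuff_headD (d :: t') c
      show (if c == d then (buildSuff (d :: t')).headD 0 + 1 else 1) :: buildSuff (d :: t')
          = _ :: buildSuff (d :: t')
      by_cases h : c = d
      · subst h
        rw [if_pos (beq_self_eq_true c)]
        rw [buildSuff_headD]
        have : (c :: t').takeWhile (· == c) = c :: t'.takeWhile (· == c) := by
          simp [List.takeWhile]
        rw [this]
        simp
      · have h1 : (c == d) = false := beq_false_of_ne h
        have h2 : (d == c) = false := beq_false_of_ne (Ne.symm h)
        rw [h1]
        simp [List.takeWhile, h2]

lemma buildSuff_drop (k : Nat) (s : List Char) :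
    (buildSuff s).drop k = buildSuff (s.drop k) := by
  induction k generalizing s with
  | zero => simp
  | succ k ih =>
      cases s with
      | nil => simp [buildSuff]
      | cons c t => rw [buildSuff_cons]; simpa using ih t

lemma takeWhile_eq_replicate (c : Char) (t : List Char) :
    t.takeWhile (· == c) = List.replicate (t.takeWhile (· == c)).length c := by
  apply List.eq_replicate_of_mem
  intro b hb
  exact eq_of_beq (List.all_eq_true.mp (List.all_takeWhile (p := (· == c)) (l := t)) b hb)

lemma walkA_eq_walkB (fuel : Nat) (s : List Char) (B : Int) (h : s.length ≤ fuel) :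
    walkA fuel s (buildSuff s) B = walkB s B := by
  induction fuel generalizing s with
  | zero =>
      have : s = [] := List.eq_nil_of_length_eq_zero (Nat.le_zero.mp h)
      subst this; simp [walkA, walkB]
  | succ fuel ih =>
      cases s with
      | nil => simp [walkA, walkB]
      | cons c t =>
          rw [buildSuff_cons]
          set pre := t.takeWhile (· == c) with hpre
          have hlenpre : pre.length ≤ t.length :=
            (List.takeWhile_sublist (l := t) (p := (· == c))).length_le
          have hdropS : (c :: t).drop (pre.length + 1) = t.drop pre.length := by simp
          have hdropSuff :
              ((pre.length + 1) :: buildSuff t).drop (pre.length + 1)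
                = buildSuff (t.drop pre.length) := by
            show (buildSuff t).drop pre.length = buildSuff (t.drop pre.length)
            exact buildSuff_drop _ _
          have hrec : walkA fuel (t.drop pre.length) (buildSuff (t.drop pre.length)) B
              = walkB (t.drop pre.length) B := by
            apply ih
            have hdl : (t.drop pre.length).length = t.length - pre.length := List.length_drop ..
            have hlen : (c :: t).length = t.length + 1 := List.length_cons ..
            omega
          have hA : walkA (fuel + 1) (c :: t) ((pre.length + 1) :: buildSuff t) B
              = if ((pre.length + 1 : Nat) : Int) = B then
                  walkA fuel ((c :: t).drop (pre.length + 1)) (((pre.length + 1) :: buildSuff t).drop (pre.length + 1)) B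
                else
                  List.replicate (pre.length + 1) c ++
                    walkA fuel ((c :: t).drop (pre.length + 1)) (((pre.length + 1) :: buildSuff t).drop (pre.length + 1)) B := rfl
          rw [hA, walkB, hdropS, hdropSuff, hrec, ← hpre]
          by_cases hB : ((pre.length + 1 : Nat) : Int) = B
          · rw [if_pos hB, if_neg (not_not_intro hB)]
            simp
          · rw [if_neg hB, if_pos hB]
            congr 1
            rw [List.replicate_succ]
            exact congrArg (c :: ·) (takeWhile_eq_replicate c t).symm

-- ===== VERDICT (by name: the statement is the Claim_ definition above) =====
theorem solve_spec : Claim_equal_solve := by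
  intro A B _ _
  show solve A B = solve_alt A B
  unfold solve solve_alt
  by_cases h1 : A.toList.length = 1
  · obtain ⟨c, hc⟩ : ∃ c, A.toList = [c] := by
      cases hA : A.toList with
      | nil => simp [hA] at h1
      | cons x xs =>
          cases xs with
          | nil => exact ⟨x, rfl⟩
          | cons y ys => simp [hA] at h1
    have hA : A = String.ofList [c] := by rw [← hc, String.ofList_toList]
    rw [hc, hA]
    by_cases hB : B = 1
    · subst hB
      simp [walkB, List.takeWhile]
    · have hb1 : (B == 1) = false := beq_false_of_ne hB
      simp only [hb1, Bool.false_eq_true, if_false]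
      simp [walkB, List.takeWhile]
      rw [if_neg (fun h => hB h.symm)]
  · have h1' : (A.toList.length == 1) = false := by simpa using h1
    rw [h1']
    simp only [Bool.false_eq_true, if_false]
    rw [walkA_eq_walkB _ _ _ (Nat.le_refl _)]

@[simp] theorem solve_raises : Claim_raises_solve := by
  unfold Claim_raises_solve
  refine ⟨fun A B _ hr hp => hp hr, by decide, rfl, ?_⟩
  show String.ofList (walkB ("" : String).toList 1) = ""
  rw [show ("" : String).toList = [] from rfl, walkB]
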